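-- pv_equiv track=rewrite | github.com/otabeck-tursunov/ecommerce | main.py | iscouple
-- ===== SOURCE A (Python) =====
-- def iscouple(text):
--     d = {}
--     for i in range(len(text)):
--         if text[i] in d.keys():
--             d[text[i]] += 1
--         else:
--             d[text[i]] = 1
--     values_list = list(d.values())
--     values_unique = list(set(values_list))
--     if len(values_unique) == 1:
--         return True
--     elif len(values_unique) == 2:
--         if abs(values_unique[0] - values_unique[1]) == 1:
--             katta = max(values_unique)
--             if values_list.count(katta) == 1:
--                 return True
--             return True
--         return False
--     return False
-- ===== SOURCE B (Python) =====
-- from collections import Counter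
--
-- def iscouple(text):
--     counts = Counter(text)
--     if not counts:
--         return False
--     vals = counts.values()
--     return max(vals) - min(vals) <= 1
-- ===== Notes on version B (the rewrite author's own statement) =====
-- stated objective: simpler
-- what changed: Replaces A's index loop building a dict plus set-of-values cardinality case analysis (with a dead count(katta) branch) by Counter(text) and a single spread test max(counts)-min(counts) <= 1.
import Mathlib
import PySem

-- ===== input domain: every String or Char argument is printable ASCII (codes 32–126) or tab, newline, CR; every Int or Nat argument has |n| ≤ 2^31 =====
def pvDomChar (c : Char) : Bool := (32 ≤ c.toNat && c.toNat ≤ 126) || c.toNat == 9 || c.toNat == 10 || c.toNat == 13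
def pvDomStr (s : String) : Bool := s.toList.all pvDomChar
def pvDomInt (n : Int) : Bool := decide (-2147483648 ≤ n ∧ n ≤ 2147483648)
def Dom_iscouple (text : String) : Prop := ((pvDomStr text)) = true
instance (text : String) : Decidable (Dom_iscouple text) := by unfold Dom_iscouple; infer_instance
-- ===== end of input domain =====

-- B replaces A's dict-building index loop and set-of-counts cardinality branching by
-- Counter(text) and a single max-min spread test; objective: simpler.


-- ===== PORT A =====
def iscouple (text : String) : Bool :=
  let cs := text.toList
  -- for i in range(len(text)): if text[i] in d.keys(): d[text[i]] += 1 else: d[text[i]] = 1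
  -- (index i comes from range(len(text)), always in range, so pyGetD is exact here)
  let d : PySem.Dict Char Int :=
    (PySem.List.pyRange 0 (cs.length : Int) 1).foldl (fun d i =>
      let c := PySem.List.pyGetD cs i ' '
      if d.contains c then d.insert c (d.getD c 0 + 1) else d.insert c 1) PySem.Dict.empty
  let values_list := d.values
  let values_unique : PySem.Set Int := PySem.Set.ofList values_list
  if values_unique.length = 1 then true
  else if values_unique.length = 2 then
    -- values_unique[0/1] are in range here (length = 2), so pyGetD is exact
    if |PySem.List.pyGetD values_unique 0 0 - PySem.List.pyGetD values_unique 1 0| = 1 then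
      -- katta = max(values_unique): nonempty here, so getD 0 never fires
      let katta := (PySem.List.max? values_unique (fun x => x)).getD 0
      if values_list.count katta = 1 then true else true
    else false
  else false

-- ===== PORT B =====
def iscouple_alt (text : String) : Bool :=
  let counts := PySem.Dict.counter text.toList
  -- 'if not counts: return False' is the none/none branch (empty dict ↔ no extrema of values)
  match PySem.List.max? counts.values (fun x => x), PySem.List.min? counts.values (fun x => x) with
  | some mx, some mn => decide (mx - mn ≤ 1)
  | _, _ => false

-- ===== PRECONDITION & SPEC =====
def Spec_iscouple (text : String) (out : Bool) : Prop := out = iscouple_alt text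
instance (text : String) (out : Bool) : Decidable (Spec_iscouple text out) := by unfold Spec_iscouple; infer_instance

-- ===== CLAIM (what is proved, stated in full; the proofs are below) =====
def Claim_equal_iscouple : Prop := ∀ (text : String), Dom_iscouple text → Spec_iscouple text (iscouple text)

-- ===== LEMMAS AND PROOFS =====

-- A's dict loop is Counter(text)
lemma iscouple_dict_eq (cs : List Char) :
    (PySem.List.pyRange 0 (cs.length : Int) 1).foldl (fun d i =>
      let c := PySem.List.pyGetD cs i ' '
      if d.contains c then d.insert c (d.getD c 0 + 1) else d.insert c 1) PySem.Dict.empty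
    = PySem.Dict.counter cs := by
  have h2 : cs.foldl (fun d c =>
        if d.contains c then d.insert c (d.getD c 0 + 1) else d.insert c 1) PySem.Dict.empty
      = PySem.Dict.counter cs := by
    rw [← PySem.Dict.foldl_insert_getD_add_one_eq_counter]
    apply PySem.List.foldl_congr_mem
    intro d c _
    cases h : d.contains c
    · simp [PySem.Dict.getD_of_not_contains d (0 : Int) h]
    · simp
  rw [← h2]
  conv_rhs => rw [← PySem.List.map_pyGetD_pyRange_zero cs ' ']
  rw [List.foldl_map]
  rfl

-- A's cardinality branching on the distinct values equals B's spread test, for ANY value list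
lemma iscouple_tail_eq (vs : List Int) :
    (let values_unique : PySem.Set Int := PySem.Set.ofList vs
     if values_unique.length = 1 then true
     else if values_unique.length = 2 then
       if |PySem.List.pyGetD values_unique 0 0 - PySem.List.pyGetD values_unique 1 0| = 1 then
         let katta := (PySem.List.max? values_unique (fun x => x)).getD 0
         if vs.count katta = 1 then true else true
       else false
     else false)
    = (match PySem.List.max? vs (fun x => x), PySem.List.min? vs (fun x => x) with
       | some mx, some mn => decide (mx - mn ≤ 1)
       | _, _ => false) := by
  have hmem : ∀ x, x ∈ PySem.Set.ofList vs ↔ x ∈ vs := fun x => PySem.Set.mem_ofList vs x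
  have hnd : (PySem.Set.ofList vs).Nodup := PySem.Set.nodup_ofList vs
  match hvu : PySem.Set.ofList vs with
  | [] =>
    have hvs : vs = [] := by
      cases vs with
      | nil => rfl
      | cons x t => exact absurd ((hmem x).2 (by simp)) (by simp [hvu])
    have hmax : PySem.List.max? (vs : List Int) (fun x => x) = none :=
      (PySem.List.max?_eq_none_iff vs _).2 hvs
    simp [hmax]
  | [a] =>
    rw [hvu] at hmem
    have ha : a ∈ vs := (hmem a).1 (by simp)
    have hvs : vs ≠ [] := by rintro rfl; simp at ha
    obtain ⟨mx, hmx⟩ := Option.ne_none_iff_exists'.1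
      (show PySem.List.max? vs (fun x : Int => x) ≠ none from
        fun h => hvs ((PySem.List.max?_eq_none_iff vs _).1 h))
    obtain ⟨mn, hmn⟩ := Option.ne_none_iff_exists'.1
      (show PySem.List.min? vs (fun x : Int => x) ≠ none from
        fun h => hvs ((PySem.List.min?_eq_none_iff vs _).1 h))
    have hmxa : mx = a := by
      have := (hmem mx).2 (PySem.List.max?_mem hmx); simpa using this
    have hmna : mn = a := by
      have := (hmem mn).2 (PySem.List.min?_mem hmn); simpa using this
    rw [hmx, hmn]
    subst hmxa hmna
    simp
  | [a, b] =>
    rw [hvu] at hmem hnd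
    have hab : a ≠ b := by simp [List.nodup_cons] at hnd; tauto
    have ha : a ∈ vs := (hmem a).1 (by simp)
    have hb : b ∈ vs := (hmem b).1 (by simp)
    have hvs : vs ≠ [] := by rintro rfl; simp at ha
    obtain ⟨mx, hmx⟩ := Option.ne_none_iff_exists'.1
      (show PySem.List.max? vs (fun x : Int => x) ≠ none from
        fun h => hvs ((PySem.List.max?_eq_none_iff vs _).1 h))
    obtain ⟨mn, hmn⟩ := Option.ne_none_iff_exists'.1
      (show PySem.List.min? vs (fun x : Int => x) ≠ none from
        fun h => hvs ((PySem.List.min?_eq_none_iff vs _).1 h))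
    have hmxv := (hmem mx).2 (PySem.List.max?_mem hmx)
    have hmnv := (hmem mn).2 (PySem.List.min?_mem hmn)
    have hmxa := PySem.List.max?_isMax hmx a ha
    have hmxb := PySem.List.max?_isMax hmx b hb
    have hmna := PySem.List.min?_isMin hmn a ha
    have hmnb := PySem.List.min?_isMin hmn b hb
    simp only at hmxa hmxb hmna hmnb
    have hg0 : PySem.List.pyGetD ([a, b] : List Int) 0 0 = a := by
      simp [PySem.List.pyGetD, PySem.List.pyIdx?, PySem.List.pyGet?]
    have hg1 : PySem.List.pyGetD ([a, b] : List Int) 1 0 = b := by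
      simp [PySem.List.pyGetD, PySem.List.pyIdx?, PySem.List.pyGet?]
    simp only [hmx, hmn, hg0, hg1, List.length_cons, List.length_nil]
    have hiff : |a - b| = 1 ↔ mx - mn ≤ 1 := by
      simp only [List.mem_cons, List.not_mem_nil, or_false] at hmxv hmnv
      rcases le_total a b with h | h
      · rw [abs_of_nonpos (by omega)]
        rcases hmxv with rfl | rfl <;> rcases hmnv with rfl | rfl <;> omega
      · rw [abs_of_nonneg (by omega)]
        rcases hmxv with rfl | rfl <;> rcases hmnv with rfl | rfl <;> omega
    by_cases h : |a - b| = 1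
    · simp [h, show mx - mn ≤ 1 from hiff.1 h]
    · simp [h, show ¬ (mx - mn ≤ 1) from fun hle => h (hiff.2 hle)]
  | a :: b :: c :: rest =>
    rw [hvu] at hmem hnd
    have ha : a ∈ vs := (hmem a).1 (by simp)
    have hb : b ∈ vs := (hmem b).1 (by simp)
    have hc : c ∈ vs := (hmem c).1 (by simp)
    have hab : a ≠ b := by simp [List.nodup_cons] at hnd; tauto
    have hac : a ≠ c := by simp [List.nodup_cons] at hnd; tauto
    have hbc : b ≠ c := by simp [List.nodup_cons] at hnd; tauto
    have hvs : vs ≠ [] := by rintro rfl; simp at ha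
    obtain ⟨mx, hmx⟩ := Option.ne_none_iff_exists'.1
      (show PySem.List.max? vs (fun x : Int => x) ≠ none from
        fun h => hvs ((PySem.List.max?_eq_none_iff vs _).1 h))
    obtain ⟨mn, hmn⟩ := Option.ne_none_iff_exists'.1
      (show PySem.List.min? vs (fun x : Int => x) ≠ none from
        fun h => hvs ((PySem.List.min?_eq_none_iff vs _).1 h))
    have hmxa := PySem.List.max?_isMax hmx a ha
    have hmxb := PySem.List.max?_isMax hmx b hb
    have hmxc := PySem.List.max?_isMax hmx c hc
    have hmna := PySem.List.min?_isMin hmn a ha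
    have hmnb := PySem.List.min?_isMin hmn b hb
    have hmnc := PySem.List.min?_isMin hmn c hc
    simp only at hmxa hmxb hmxc hmna hmnb hmnc
    have hspread : ¬ (mx - mn ≤ 1) := by omega
    simp [hmx, hmn, hspread]

-- ===== VERDICT (by name: the statement is the Claim_ definition above) =====
theorem iscouple_spec : Claim_equal_iscouple := by
  intro text _
  show iscouple text = iscouple_alt text
  simp only [iscouple, iscouple_alt]
  rw [iscouple_dict_eq text.toList]
  exact iscouple_tail_eq (PySem.Dict.counter text.toList).values
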